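-- pv_equiv track=rewrite | github.com/sun-kaiming/Progressive-Self-Learning-for-SRIS | testOEIS_Interface2.py | formula_symbolic_nums
-- ===== SOURCE A (Python) =====
-- def formula_symbolic_nums(formula):
--     """
--     得到一个公式中运算符号的数量
--     """
--     operators_int = {
--         'add': 2,
--         'sub': 2,
--         'mul': 2,
--         'idiv': 2,
--         'mod': 2,
--         'abs': 1,
--         'sqr': 1,
--         'relu': 1,
--         'sign': 1,
--         # 'step': 1,
--     }
--     count = 0
--     for sym in formula.strip().split():
--         if sym in operators_int:
--             count += 1
--     return count
-- ===== SOURCE B (Python) =====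
-- def formula_symbolic_nums(formula):
--     """
--     得到一个公式中运算符号的数量
--     """
--     operators = ['add', 'sub', 'mul', 'idiv', 'mod', 'abs', 'sqr', 'relu', 'sign']
--     tokens = formula.strip().split()
--     return sum(tokens.count(op) for op in operators)
-- ===== Notes on version B (the rewrite author's own statement) =====
-- stated objective: alternative
-- what changed: B inverts the traversal: instead of a single pass over the tokens with a membership test against the operator dict, it tokenizes once and sums tokens.count(op) over the fixed operator vocabulary (one scan of the token list per operator).
import Mathlib
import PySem

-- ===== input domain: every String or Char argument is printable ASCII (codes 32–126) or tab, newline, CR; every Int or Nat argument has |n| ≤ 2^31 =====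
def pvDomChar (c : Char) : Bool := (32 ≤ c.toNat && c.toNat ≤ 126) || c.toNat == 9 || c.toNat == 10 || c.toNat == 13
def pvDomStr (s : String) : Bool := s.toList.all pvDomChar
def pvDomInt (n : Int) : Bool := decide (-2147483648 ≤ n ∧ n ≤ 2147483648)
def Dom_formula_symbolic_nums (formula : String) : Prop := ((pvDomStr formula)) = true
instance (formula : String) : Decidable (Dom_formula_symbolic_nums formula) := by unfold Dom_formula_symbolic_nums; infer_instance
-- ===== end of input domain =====

-- B replaces A's single token scan with a dict-membership test by one List.count scan of the
-- token list per operator in the fixed vocabulary, summed up (alternative decomposition, same result).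

-- ===== PORT A =====
-- the dict literal operators_int
def fsnOperatorsInt : PySem.Dict String Int :=
  PySem.Dict.ofList [("add", 2), ("sub", 2), ("mul", 2), ("idiv", 2), ("mod", 2),
                     ("abs", 1), ("sqr", 1), ("relu", 1), ("sign", 1)]

def formula_symbolic_nums (formula : String) : Int :=
  (PySem.Str.split₀ (PySem.Str.strip formula)).foldl
    (fun count sym => if fsnOperatorsInt.contains sym then count + 1 else count) 0

-- ===== PORT B =====
def fsnOperators : List String := ["add", "sub", "mul", "idiv", "mod", "abs", "sqr", "relu", "sign"]

def formula_symbolic_nums_alt (formula : String) : Int :=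
  let tokens := PySem.Str.split₀ (PySem.Str.strip formula)
  (fsnOperators.map (fun op => (PySem.List.count tokens op : Int))).sum

-- ===== PRECONDITION & SPEC =====
def Spec_formula_symbolic_nums (formula : String) (out : Int) : Prop := out = formula_symbolic_nums_alt formula
instance (formula : String) (out : Int) : Decidable (Spec_formula_symbolic_nums formula out) := by unfold Spec_formula_symbolic_nums; infer_instance

-- ===== CLAIM (what is proved, stated in full; the proofs are below) =====
def Claim_equal_formula_symbolic_nums : Prop := ∀ (formula : String), Dom_formula_symbolic_nums formula → Spec_formula_symbolic_nums formula (formula_symbolic_nums formula)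

-- ===== LEMMAS AND PROOFS =====

-- summing the one-hot indicator over a duplicate-free list is a membership test
theorem fsn_sum_ind (l : List String) (hnd : l.Nodup) (t : String) :
    (l.map (fun op => if t == op then (1 : Int) else 0)).sum
      = if t ∈ l then 1 else 0 := by
  induction l with
  | nil => simp
  | cons a l ih =>
    rcases List.nodup_cons.mp hnd with ⟨ha, hl⟩
    rw [List.map_cons, List.sum_cons, ih hl]
    by_cases h : t = a
    · subst h
      simp [ha]
    · simp [h, beq_iff_eq]

-- per-operator counts over a duplicate-free vocabulary sum to one membership-filtered count
theorem fsn_sum_count (l : List String) (hnd : l.Nodup) (ts : List String) :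
    (l.map (fun op => (PySem.List.count ts op : Int))).sum
      = (ts.countP (fun s => decide (s ∈ l)) : Int) := by
  induction ts with
  | nil => simp [PySem.List.count_eq]
  | cons t ts ih =>
    simp only [PySem.List.count_eq] at *
    have : (l.map (fun op => ((List.count op (t :: ts) : Nat) : Int))).sum
        = (l.map (fun op => ((List.count op ts : Nat) : Int)
            + (if t == op then (1 : Int) else 0))).sum := by
      apply congrArg
      apply List.map_congr_left
      intro op _
      rw [List.count_cons]
      split <;> simp
    rw [this, PySem.List.sum_map_add_int, ih, fsn_sum_ind l hnd t, List.countP_cons]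
    by_cases h : t ∈ l <;> simp [h]

-- membership in the operator dict is membership in the operator list
theorem fsn_contains_eq (s : String) :
    fsnOperatorsInt.contains s = decide (s ∈ fsnOperators) := by
  rw [PySem.Dict.contains_eq_decide_mem_keys]
  have : fsnOperatorsInt.keys = fsnOperators := by rfl
  rw [this]

theorem fsn_nodup : fsnOperators.Nodup := by decide

-- ===== VERDICT (by name: the statement is the Claim_ definition above) =====
set_option maxHeartbeats 1000000 in
theorem formula_symbolic_nums_spec : Claim_equal_formula_symbolic_nums := by
  intro formula _
  unfold Spec_formula_symbolic_nums formula_symbolic_nums formula_symbolic_nums_alt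
  simp only [fsn_contains_eq]
  rw [PySem.List.foldl_count_if (fun s => decide (s ∈ fsnOperators))]
  rw [fsn_sum_count fsnOperators fsn_nodup]
  simp
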